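-- pv_equiv track=rewrite | github.com/Mr-vedant-gupta/Karnaugh_maps | karnaugh_maps.py | update_k_map
-- ===== SOURCE A (Python) =====
-- import copy
--
-- def wrap_update(l: list, x: int, y: int, value):
--     l[x % 4][y % 4] = value
--
-- def update_k_map(k_map, rectangle):
--     new_k_map = copy.deepcopy(k_map)
--     pos = rectangle[2]
--     dim = rectangle[3]
--     for row in range(pos[0], pos[0] + dim[0]):
--         for column in range(pos[1], pos[1] + dim[1]):
--             wrap_update(new_k_map, row, column, 0)
--     return new_k_map
-- ===== SOURCE B (Python) =====
-- def update_k_map(k_map, rectangle):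
--     pos = rectangle[2]
--     dim = rectangle[3]
--     rows = {(pos[0] + i) % 4 for i in range(min(dim[0], 4))}
--     cols = {(pos[1] + j) % 4 for j in range(min(dim[1], 4))}
--     return [[0 if c in cols else v for c, v in enumerate(row)] if r in rows else list(row)
--             for r, row in enumerate(k_map)]
-- ===== Notes on version B (the rewrite author's own statement) =====
-- stated objective: simpler
-- what changed: B drops the deepcopy-and-mutate nested range(dim[0]) x range(dim[1]) write loop and instead precomputes the at-most-4-element wrapped row/column residue sets and builds the result in one pure enumerate pass over the map, zeroing a cell iff its row and column are in those sets.
import Mathlib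
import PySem

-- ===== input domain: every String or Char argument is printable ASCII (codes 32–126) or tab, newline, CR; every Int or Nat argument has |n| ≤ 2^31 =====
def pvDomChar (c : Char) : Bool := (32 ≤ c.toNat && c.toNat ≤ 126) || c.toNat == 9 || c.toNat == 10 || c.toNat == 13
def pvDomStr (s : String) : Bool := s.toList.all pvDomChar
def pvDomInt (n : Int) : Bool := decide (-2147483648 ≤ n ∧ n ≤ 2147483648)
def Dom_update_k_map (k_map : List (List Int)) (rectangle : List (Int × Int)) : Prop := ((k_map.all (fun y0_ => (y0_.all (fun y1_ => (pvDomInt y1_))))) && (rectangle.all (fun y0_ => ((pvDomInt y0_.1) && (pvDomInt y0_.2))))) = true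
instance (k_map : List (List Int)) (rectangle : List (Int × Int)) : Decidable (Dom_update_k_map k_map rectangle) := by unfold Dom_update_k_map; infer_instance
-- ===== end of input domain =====

-- B replaces A's mutate-a-deepcopy nested range loop over the rectangle by one pure pass over the
-- map that zeroes the cells whose wrapped row/column lie in the two (at most 4-element) residue
-- sets: a simpler, pure decomposition. Neither version mutates its arguments.

-- ===== PORT A =====
-- l[x % 4][y % 4] = value  (in-place write; in range on every input admitted by Pre_)
def wrap_update (l : List (List Int)) (x : Int) (y : Int) (value : Int) : List (List Int) :=
  l.modify (PySem.Int.mod x 4).toNat (fun row => row.set (PySem.Int.mod y 4).toNat value)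

def update_k_map (k_map : List (List Int)) (rectangle : List (Int × Int)) : List (List Int) :=
  let new_k_map := k_map  -- copy.deepcopy(k_map): same value; A mutates only the copy
  let pos := PySem.List.pyGetD rectangle 2 (0, 0)
  let dim := PySem.List.pyGetD rectangle 3 (0, 0)
  (PySem.List.pyRange pos.1 (pos.1 + dim.1) 1).foldl
    (fun m row =>
      (PySem.List.pyRange pos.2 (pos.2 + dim.2) 1).foldl
        (fun m' column => wrap_update m' row column 0) m)
    new_k_map

-- ===== PORT B =====
def update_k_map_alt (k_map : List (List Int)) (rectangle : List (Int × Int)) : List (List Int) :=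
  let pos := PySem.List.pyGetD rectangle 2 (0, 0)
  let dim := PySem.List.pyGetD rectangle 3 (0, 0)
  let rows : PySem.Set Int :=
    PySem.Set.ofList ((PySem.List.pyRange 0 (min dim.1 4) 1).map (fun i => PySem.Int.mod (pos.1 + i) 4))
  let cols : PySem.Set Int :=
    PySem.Set.ofList ((PySem.List.pyRange 0 (min dim.2 4) 1).map (fun j => PySem.Int.mod (pos.2 + j) 4))
  (PySem.List.enumerate k_map).map (fun p =>
    if p.1 ∈ rows then
      (PySem.List.enumerate p.2).map (fun q => if q.1 ∈ cols then 0 else q.2)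
    else p.2)

-- ===== PRECONDITION & SPEC =====
-- the wrapped indices A writes: residues of the first min(dim,4) offsets (membership only; not a re-simulation)
def pvTouched (p d : Int) : List Nat :=
  (List.range (min d 4).toNat).map (fun i => (PySem.Int.mod (p + (i : Int)) 4).toNat)

-- Pre_ excludes exactly the inputs where the Python A raises: rectangle shorter than 4 (IndexError on
-- rectangle[3]) or some wrapped cell of the rectangle outside the k_map (IndexError on the write).
def Pre_update_k_map (k_map : List (List Int)) (rectangle : List (Int × Int)) : Prop :=
  4 ≤ rectangle.length ∧
  (∀ r ∈ pvTouched (PySem.List.pyGetD rectangle 2 (0, 0)).1 (PySem.List.pyGetD rectangle 3 (0, 0)).1,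
    ∀ c ∈ pvTouched (PySem.List.pyGetD rectangle 2 (0, 0)).2 (PySem.List.pyGetD rectangle 3 (0, 0)).2,
      r < k_map.length ∧ c < (k_map.getD r []).length)
instance (k_map : List (List Int)) (rectangle : List (Int × Int)) : Decidable (Pre_update_k_map k_map rectangle) := by unfold Pre_update_k_map; infer_instance

def pvWitness_update_k_map : List (List Int) × (List (Int × Int)) :=
  ([[1, 0, 1, 1], [0, 1, 1, 1], [1, 1, 1, 0], [1, 1, 0, 1]], [(0, 0), (0, 0), (3, 2), (2, 3)])

def Spec_update_k_map (k_map : List (List Int)) (rectangle : List (Int × Int)) (out : List (List Int)) : Prop := out = update_k_map_alt k_map rectangle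
instance (k_map : List (List Int)) (rectangle : List (Int × Int)) (out : List (List Int)) : Decidable (Spec_update_k_map k_map rectangle out) := by unfold Spec_update_k_map; infer_instance

-- ===== CLAIM (what is proved, stated in full; the proofs are below) =====
def Claim_equal_update_k_map : Prop := ∀ (k_map : List (List Int)) (rectangle : List (Int × Int)), Dom_update_k_map k_map rectangle → Pre_update_k_map k_map rectangle → Spec_update_k_map k_map rectangle (update_k_map k_map rectangle)

-- ===== LEMMAS AND PROOFS =====

-- the wrapped index of a write: (x % 4) as a Nat (Python % 4 is nonnegative)
def toIdx (x : Int) : Nat := (PySem.Int.mod x 4).toNat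

-- the effect of A's inner column loop on one row
def gRow (C : List Int) (rw : List Int) : List Int :=
  C.foldl (fun rw c => rw.set (toIdx c) 0) rw

theorem gRow_getElem? (C : List Int) (rw : List Int) (j : Nat) :
    (gRow C rw)[j]? = if ∃ c ∈ C, toIdx c = j then rw[j]?.map (fun _ => (0:Int)) else rw[j]? := by
  induction C generalizing rw with
  | nil => simp [gRow]
  | cons c cs ih =>
    show (gRow cs (rw.set (toIdx c) 0))[j]? = _
    rw [ih]
    by_cases h1 : toIdx c = j
    · subst h1
      have hset : (rw.set (toIdx c) 0)[toIdx c]? = rw[toIdx c]?.map (fun _ => (0:Int)) := by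
        by_cases hj : toIdx c < rw.length
        · simp [hj]
        · simp [hj]
      have hc : ∃ c' ∈ c :: cs, toIdx c' = toIdx c := ⟨c, List.mem_cons_self .., rfl⟩
      rw [if_pos hc]
      split_ifs with h2 <;> simp only [hset, Option.map_map] <;>
        cases rw[toIdx c]? <;> rfl
    · have hcond : (∃ c' ∈ c :: cs, toIdx c' = j) ↔ ∃ c' ∈ cs, toIdx c' = j := by
        simp only [List.mem_cons]
        constructor
        · rintro ⟨c', hc', he⟩
          rcases hc' with rfl | hm
          · exact absurd he h1
          · exact ⟨c', hm, he⟩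
        · rintro ⟨c', hm, he⟩; exact ⟨c', Or.inr hm, he⟩
      have hset : (rw.set (toIdx c) 0)[j]? = rw[j]? := by simp [h1]
      simp only [hset, hcond]

theorem gRow_idem (C : List Int) (rw : List Int) : gRow C (gRow C rw) = gRow C rw := by
  apply List.ext_getElem?
  intro j
  rw [gRow_getElem?, gRow_getElem?]
  split_ifs with h
  · cases rw[j]? <;> rfl
  · rfl

-- A's inner loop is one modify of the wrapped row by gRow
theorem foldl_wrap (row : Int) (C : List Int) (m : List (List Int)) :
    C.foldl (fun m' c => m'.modify (toIdx row) (fun rw => rw.set (toIdx c) 0)) m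
      = m.modify (toIdx row) (gRow C) := by
  induction C generalizing m with
  | nil => exact (List.modify_id _ _).symm
  | cons c cs ih =>
    show cs.foldl _ (m.modify (toIdx row) _) = _
    rw [ih]
    apply List.ext_getElem?
    intro i
    simp only [List.getElem?_modify]
    cases m[i]? <;> by_cases h : toIdx row = i <;> simp [gRow, h]

-- A's outer loop, pointwise (gRow is idempotent, so repeated wrapped rows do not matter)
theorem foldl_outer_getElem? (C R : List Int) (m : List (List Int)) (i : Nat) :
    (R.foldl (fun m r => m.modify (toIdx r) (gRow C)) m)[i]?
      = if ∃ r ∈ R, toIdx r = i then m[i]?.map (gRow C) else m[i]? := by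
  induction R generalizing m with
  | nil => simp
  | cons r rs ih =>
    show (rs.foldl _ (m.modify (toIdx r) (gRow C)))[i]? = _
    rw [ih]
    by_cases h1 : toIdx r = i
    · have hmod : (m.modify (toIdx r) (gRow C))[i]? = m[i]?.map (gRow C) := by
        simp [h1]
      have hc : ∃ r' ∈ r :: rs, toIdx r' = i := ⟨r, List.mem_cons_self .., h1⟩
      rw [if_pos hc]
      split_ifs with h2 <;> simp only [hmod, Option.map_map] <;>
        cases m[i]? <;> simp [gRow_idem]
    · have hcond : (∃ r' ∈ r :: rs, toIdx r' = i) ↔ ∃ r' ∈ rs, toIdx r' = i := by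
        simp only [List.mem_cons]
        constructor
        · rintro ⟨r', hr', he⟩
          rcases hr' with rfl | hm
          · exact absurd he h1
          · exact ⟨r', hm, he⟩
        · rintro ⟨r', hm, he⟩; exact ⟨r', Or.inr hm, he⟩
      have hmod : (m.modify (toIdx r) (gRow C))[i]? = m[i]? := by
        simp [h1]
      simp only [hmod, hcond]

-- B's residue set names exactly the wrapped indices A's range touches
theorem mem_residue_set (p d : Int) (i : Nat) :
    ((i : Int) ∈ PySem.Set.ofList
        ((PySem.List.pyRange 0 (min d 4) 1).map (fun q => PySem.Int.mod (p + q) 4)))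
      ↔ ∃ r ∈ PySem.List.pyRange p (p + d) 1, toIdx r = i := by
  have hm : ∀ x : Int, PySem.Int.mod x 4 = x % 4 := fun x =>
    PySem.Int.mod_eq_emod_of_pos (by norm_num)
  rw [PySem.Set.mem_ofList]
  simp only [List.mem_map, PySem.List.mem_pyRange_one, toIdx, hm]
  constructor
  · rintro ⟨q, ⟨hq0, hq1⟩, he⟩
    exact ⟨p + q, ⟨by omega, by omega⟩, by omega⟩
  · rintro ⟨r, ⟨hr0, hr1⟩, he⟩
    exact ⟨(r - p) % 4, ⟨by omega, by omega⟩, by omega⟩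

-- gRow of A's column range is B's inner enumerate pass
theorem gRow_eq_inner (p1 d1 : Int) (row : List Int) :
    gRow (PySem.List.pyRange p1 (p1 + d1) 1) row
      = (PySem.List.enumerate row).map (fun q =>
          if q.1 ∈ PySem.Set.ofList ((PySem.List.pyRange 0 (min d1 4) 1).map
              (fun j => PySem.Int.mod (p1 + j) 4)) then 0 else q.2) := by
  apply List.ext_getElem?
  intro j
  rw [gRow_getElem?, List.getElem?_map, PySem.List.getElem?_enumerate]
  cases row[j]? with
  | none => simp
  | some v =>
    simp only [Option.map_some, Option.map_map, Function.comp, zero_add]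
    by_cases h : ∃ c ∈ PySem.List.pyRange p1 (p1 + d1) 1, toIdx c = j
    · rw [if_pos h, if_pos ((mem_residue_set p1 d1 j).mpr h)]
    · rw [if_neg h, if_neg (fun hc => h ((mem_residue_set p1 d1 j).mp hc))]

-- the two ports agree on every input
theorem ports_eq (k_map : List (List Int)) (rectangle : List (Int × Int)) :
    update_k_map k_map rectangle = update_k_map_alt k_map rectangle := by
  unfold update_k_map update_k_map_alt
  set pos := PySem.List.pyGetD rectangle 2 (0, 0) with hpos
  set dim := PySem.List.pyGetD rectangle 3 (0, 0) with hdim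
  have hA : (PySem.List.pyRange pos.1 (pos.1 + dim.1) 1).foldl
      (fun m row => (PySem.List.pyRange pos.2 (pos.2 + dim.2) 1).foldl
        (fun m' column => wrap_update m' row column 0) m) k_map
      = (PySem.List.pyRange pos.1 (pos.1 + dim.1) 1).foldl
        (fun m r => m.modify (toIdx r) (gRow (PySem.List.pyRange pos.2 (pos.2 + dim.2) 1))) k_map := by
    congr 1
    funext m r
    exact foldl_wrap r _ m
  rw [hA]
  apply List.ext_getElem?
  intro i
  rw [foldl_outer_getElem?, List.getElem?_map, PySem.List.getElem?_enumerate]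
  cases k_map[i]? with
  | none => simp
  | some row =>
    simp only [Option.map_some, Option.map_map, Function.comp, zero_add]
    by_cases h : ∃ r ∈ PySem.List.pyRange pos.1 (pos.1 + dim.1) 1, toIdx r = i
    · rw [if_pos h, if_pos ((mem_residue_set pos.1 dim.1 i).mpr h), gRow_eq_inner]
    · rw [if_neg h, if_neg (fun hc => h ((mem_residue_set pos.1 dim.1 i).mp hc))]

-- ===== VERDICT (by name: the statement is the Claim_ definition above) =====
theorem update_k_map_spec : Claim_equal_update_k_map := by
  intro k_map rectangle _ _
  show update_k_map k_map rectangle = update_k_map_alt k_map rectangle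
  exact ports_eq k_map rectangle
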